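-- pv_equiv track=rewrite | github.com/LeonardoVDN/Analisador-Telegram | data_preparation.py | get_media_summary
-- ===== SOURCE A (Python) =====
-- def get_media_summary(transcriptions):
--     if not transcriptions:
--         return None
--
--     total = len(transcriptions)
--     from_links = sum(1 for t in transcriptions if t.get("source") == "link")
--     from_telegram = sum(1 for t in transcriptions if t.get("source") == "telegram")
--
--     return {
--         "total_transcribed": total,
--         "from_links": from_links,
--         "from_telegram": from_telegram,
--     }
-- ===== SOURCE B (Python) =====
-- def get_media_summary(transcriptions):
--     # One tabulation pass over the list instead of two separate filtering scans.
--     if not transcriptions: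
--         return None
--
--     counts = {}
--     for t in transcriptions:
--         s = t.get("source")
--         counts[s] = counts.get(s, 0) + 1
--
--     return {
--         "total_transcribed": len(transcriptions),
--         "from_links": counts.get("link", 0),
--         "from_telegram": counts.get("telegram", 0),
--     }
-- ===== Notes on version B (the rewrite author's own statement) =====
-- stated objective: alternative
-- what changed: Replaces A's two separate filtering scans (one per source kind) with a single pass that tabulates all sources into a dict, then reads the two counts by lookup.
import Mathlib
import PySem

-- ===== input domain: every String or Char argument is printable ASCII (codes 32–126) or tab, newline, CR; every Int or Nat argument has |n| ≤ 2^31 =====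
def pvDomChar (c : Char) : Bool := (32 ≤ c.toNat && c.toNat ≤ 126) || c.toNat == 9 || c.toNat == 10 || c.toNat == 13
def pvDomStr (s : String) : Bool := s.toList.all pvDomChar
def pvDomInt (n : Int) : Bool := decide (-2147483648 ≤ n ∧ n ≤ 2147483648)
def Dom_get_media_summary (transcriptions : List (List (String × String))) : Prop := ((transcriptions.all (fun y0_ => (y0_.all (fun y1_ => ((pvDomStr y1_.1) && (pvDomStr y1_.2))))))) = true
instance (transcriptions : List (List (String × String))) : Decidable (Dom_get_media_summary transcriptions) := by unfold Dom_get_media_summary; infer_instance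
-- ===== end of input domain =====

-- B tabulates sources in one pass into a dict instead of A's two filtering scans; objective: alternative (return value only).

-- t.get("source"): first-match lookup in the association list (Python dict .get, None if absent)
def pyGetSource (t : List (String × String)) : Option String :=
  (t.find? (fun kv => kv.1 == "source")).map (·.2)

-- ===== PORT A =====
def get_media_summary (transcriptions : List (List (String × String))) : Option (List (String × Int)) :=
  if transcriptions = [] then none
  else
    let total : Int := transcriptions.length
    let from_links : Int :=
      transcriptions.foldl (fun acc t => if pyGetSource t == some "link" then acc + 1 else acc) 0
    let from_telegram : Int :=
      transcriptions.foldl (fun acc t => if pyGetSource t == some "telegram" then acc + 1 else acc) 0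
    some [("total_transcribed", total), ("from_links", from_links), ("from_telegram", from_telegram)]

-- ===== PORT B =====
def get_media_summary_alt (transcriptions : List (List (String × String))) : Option (List (String × Int)) :=
  if transcriptions = [] then none
  else
    let counts : PySem.Dict (Option String) Int :=
      transcriptions.foldl (fun d t => d.modify (pyGetSource t) 0 (· + 1)) PySem.Dict.empty
    some [("total_transcribed", (transcriptions.length : Int)),
          ("from_links", counts.getD (some "link") 0),
          ("from_telegram", counts.getD (some "telegram") 0)]

-- ===== PRECONDITION & SPEC =====
def Spec_get_media_summary (transcriptions : List (List (String × String))) (out : Option (List (String × Int))) : Prop := out = get_media_summary_alt transcriptions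
instance (transcriptions : List (List (String × String))) (out : Option (List (String × Int))) : Decidable (Spec_get_media_summary transcriptions out) := by unfold Spec_get_media_summary; infer_instance

-- ===== CLAIM (what is proved, stated in full; the proofs are below) =====
def Claim_equal_get_media_summary : Prop := ∀ (transcriptions : List (List (String × String))), Dom_get_media_summary transcriptions → Spec_get_media_summary transcriptions (get_media_summary transcriptions)

-- ===== LEMMAS AND PROOFS =====

theorem count_foldl (s : String) (ts : List (List (String × String))) :
    ∀ acc : Int,
      ts.foldl (fun acc t => if pyGetSource t == some s then acc + 1 else acc) acc
        = acc + ((ts.map pyGetSource).count (some s) : Int) := by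
  induction ts with
  | nil => intro acc; simp
  | cons h t ih =>
    intro acc
    simp only [List.foldl_cons, List.map_cons, List.count_cons, ih]
    by_cases hc : pyGetSource h = some s
    · simp [hc]; ring
    · simp [hc, beq_iff_eq]

theorem getD_counts (s : String) (ts : List (List (String × String))) :
    (ts.foldl (fun d t => d.modify (pyGetSource t) 0 (· + 1))
        (PySem.Dict.empty : PySem.Dict (Option String) Int)).getD (some s) 0
      = ((ts.map pyGetSource).count (some s) : Int) := by
  rw [← List.foldl_map (f := pyGetSource) (g := fun (d : PySem.Dict (Option String) Int) x => d.modify x 0 (· + 1))]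
  rw [PySem.Dict.getD_foldl_modify_add_one]
  simp [PySem.Dict.empty, PySem.Dict.getD, PySem.Dict.get?]

-- ===== VERDICT (by name: the statement is the Claim_ definition above) =====
theorem get_media_summary_spec : Claim_equal_get_media_summary := by
  intro ts _
  unfold Spec_get_media_summary get_media_summary get_media_summary_alt
  by_cases h : ts = []
  · simp [h]
  · simp only [h, if_false]
    rw [count_foldl, count_foldl, getD_counts, getD_counts]
    simp
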